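-- pv_equiv track=rewrite | github.com/SynapseWeb/PyReconstruct | PyReconstruct/modules/backend/func/state_manager.py | alignmentPreferencesChanged
-- ===== SOURCE A (Python) =====
-- def getAlignment(attrs, name):
--     if name in attrs and "alignment" in attrs[name]:
--         return attrs[name]["alignment"]
--     else:
--         return None
--
-- def alignmentPreferencesChanged(pre_series_attrs, post_series_attrs):
--     """Check if the alignment preferences for objects and ztraces has changed."""
--     pre_obj_attrs = pre_series_attrs["obj_attrs"]
--     post_obj_attrs = post_series_attrs["obj_attrs"]
--     pre_ztrace_attrs = pre_series_attrs["ztrace_attrs"]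
--     post_ztrace_attrs = post_series_attrs["ztrace_attrs"]
--
--     for pre, post in (
--         (pre_obj_attrs, post_obj_attrs),
--         (pre_ztrace_attrs, post_ztrace_attrs)
--     ):
--         for name in set(pre.keys()).union(post.keys()):
--             if getAlignment(pre, name) != getAlignment(post, name):
--                 return True
--
--     return False
-- ===== SOURCE B (Python) =====
-- def alignmentPreferencesChanged(pre_series_attrs, post_series_attrs):
--     """Check if the alignment preferences for objects and ztraces has changed."""
--     def proj(attrs):
--         # name -> alignment, keeping only names that actually carry an alignment
--         return {n: d["alignment"] for n, d in attrs.items() if "alignment" in d}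
--     return any(
--         proj(pre_series_attrs[key]) != proj(post_series_attrs[key])
--         for key in ("obj_attrs", "ztrace_attrs")
--     )
-- ===== Notes on version B (the rewrite author's own statement) =====
-- stated objective: simpler
-- what changed: Instead of forming the union of the two key sets and comparing per-name alignment lookups pairwise, B projects each attrs dict once to a name->alignment dict (dropping names without an alignment) and compares the two projections with dict ==.
import Mathlib
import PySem

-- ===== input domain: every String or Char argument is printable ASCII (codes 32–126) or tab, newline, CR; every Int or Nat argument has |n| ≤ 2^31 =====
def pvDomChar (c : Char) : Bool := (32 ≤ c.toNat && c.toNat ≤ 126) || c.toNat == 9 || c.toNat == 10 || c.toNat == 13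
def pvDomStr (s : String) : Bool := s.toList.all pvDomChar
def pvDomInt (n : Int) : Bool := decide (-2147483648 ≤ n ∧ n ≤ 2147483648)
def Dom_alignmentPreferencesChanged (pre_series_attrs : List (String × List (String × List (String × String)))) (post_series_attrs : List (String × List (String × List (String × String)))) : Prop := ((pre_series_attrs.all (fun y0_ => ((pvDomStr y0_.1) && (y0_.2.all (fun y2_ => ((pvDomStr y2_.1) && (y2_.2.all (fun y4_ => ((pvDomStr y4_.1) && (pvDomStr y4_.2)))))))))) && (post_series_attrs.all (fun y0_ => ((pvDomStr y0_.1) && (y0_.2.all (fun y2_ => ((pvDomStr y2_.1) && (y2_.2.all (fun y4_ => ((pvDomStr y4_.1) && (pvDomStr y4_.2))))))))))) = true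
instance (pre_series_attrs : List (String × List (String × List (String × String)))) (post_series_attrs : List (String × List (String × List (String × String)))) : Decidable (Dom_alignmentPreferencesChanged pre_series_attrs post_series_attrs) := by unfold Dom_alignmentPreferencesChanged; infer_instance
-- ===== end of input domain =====

-- B replaces A's union-of-keys pairwise comparison by building one name->alignment
-- projection dict per attrs dict and comparing the projections with Python's dict ==
-- (objective: simpler).


-- ===== PORT A =====
-- getAlignment: attrs[name]["alignment"] if both keys present, else None
def getAlignmentA (attrs : List (String × List (String × String))) (name : String) : Option String :=
  match (PySem.Dict.mk attrs).get? name with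
  | some inner => (PySem.Dict.mk inner).get? "alignment"
  | none => none

def alignmentPreferencesChanged (pre_series_attrs : List (String × List (String × List (String × String)))) (post_series_attrs : List (String × List (String × List (String × String)))) : Bool :=
  match (PySem.Dict.mk pre_series_attrs).get? "obj_attrs",
        (PySem.Dict.mk post_series_attrs).get? "obj_attrs",
        (PySem.Dict.mk pre_series_attrs).get? "ztrace_attrs",
        (PySem.Dict.mk post_series_attrs).get? "ztrace_attrs" with
  | some pre_obj, some post_obj, some pre_z, some post_z =>
    -- for pre, post in (...): for name in set(pre.keys()).union(post.keys()): early return True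
    [(pre_obj, post_obj), (pre_z, post_z)].any (fun pq =>
      (PySem.Set.union (PySem.Set.ofList ((PySem.Dict.mk pq.1).keys)) ((PySem.Dict.mk pq.2).keys)).any
        (fun name => !(getAlignmentA pq.1 name == getAlignmentA pq.2 name)))
  | _, _, _, _ => false  -- KeyError in Python; excluded by Pre_

-- ===== PORT B =====
-- proj: {n: d["alignment"] for n, d in attrs.items() if "alignment" in d}
def projB (attrs : List (String × List (String × String))) : PySem.Dict String String :=
  attrs.foldl (fun d p =>
    match (PySem.Dict.mk p.2).get? "alignment" with
    | some v => d.insert p.1 v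
    | none => d) PySem.Dict.empty

-- Python's dict == : same key set, same value at every key (insertion order ignored)
def pyDictEqB (d e : PySem.Dict String String) : Bool :=
  d.keys.all (fun k => e.get? k == d.get? k) && e.keys.all (fun k => d.get? k == e.get? k)

def alignmentPreferencesChanged_alt (pre_series_attrs : List (String × List (String × List (String × String)))) (post_series_attrs : List (String × List (String × List (String × String)))) : Bool :=
  [("obj_attrs" : String), "ztrace_attrs"].any (fun key =>
    match (PySem.Dict.mk pre_series_attrs).get? key with
    | none => false  -- KeyError in Python; excluded by Pre_
    | some a =>
      match (PySem.Dict.mk post_series_attrs).get? key with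
      | none => false  -- KeyError in Python; excluded by Pre_
      | some b => !(pyDictEqB (projB a) (projB b)))

-- ===== PRECONDITION & SPEC =====
-- Pre_ excludes inputs where A raises KeyError ("obj_attrs"/"ztrace_attrs" missing from either
-- argument), and requires each inner attrs association list to have distinct names: the lists
-- encode Python dicts, whose keys are necessarily distinct, so no Python input is lost.
def Pre_alignmentPreferencesChanged (pre_series_attrs : List (String × List (String × List (String × String)))) (post_series_attrs : List (String × List (String × List (String × String)))) : Prop :=
  (PySem.Dict.mk pre_series_attrs).contains "obj_attrs" = true ∧
  (PySem.Dict.mk post_series_attrs).contains "obj_attrs" = true ∧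
  (PySem.Dict.mk pre_series_attrs).contains "ztrace_attrs" = true ∧
  (PySem.Dict.mk post_series_attrs).contains "ztrace_attrs" = true ∧
  (∀ p ∈ pre_series_attrs, (p.2.map Prod.fst).Nodup) ∧
  (∀ p ∈ post_series_attrs, (p.2.map Prod.fst).Nodup)
instance (pre_series_attrs : List (String × List (String × List (String × String)))) (post_series_attrs : List (String × List (String × List (String × String)))) : Decidable (Pre_alignmentPreferencesChanged pre_series_attrs post_series_attrs) := by unfold Pre_alignmentPreferencesChanged; infer_instance

def pvWitness_alignmentPreferencesChanged : (List (String × List (String × List (String × String)))) × (List (String × List (String × List (String × String)))) :=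
  ([("obj_attrs", [("cell1", [("alignment", "default")])]), ("ztrace_attrs", [])],
   [("obj_attrs", [("cell1", [("alignment", "exp1")])]), ("ztrace_attrs", [])])

def Spec_alignmentPreferencesChanged (pre_series_attrs : List (String × List (String × List (String × String)))) (post_series_attrs : List (String × List (String × List (String × String)))) (out : Bool) : Prop := out = alignmentPreferencesChanged_alt pre_series_attrs post_series_attrs
instance (pre_series_attrs : List (String × List (String × List (String × String)))) (post_series_attrs : List (String × List (String × List (String × String)))) (out : Bool) : Decidable (Spec_alignmentPreferencesChanged pre_series_attrs post_series_attrs out) := by unfold Spec_alignmentPreferencesChanged; infer_instance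

-- ===== CLAIM (what is proved, stated in full; the proofs are below) =====
def Claim_equal_alignmentPreferencesChanged : Prop := ∀ (pre_series_attrs : List (String × List (String × List (String × String)))) (post_series_attrs : List (String × List (String × List (String × String)))), Dom_alignmentPreferencesChanged pre_series_attrs post_series_attrs → Pre_alignmentPreferencesChanged pre_series_attrs post_series_attrs → Spec_alignmentPreferencesChanged pre_series_attrs post_series_attrs (alignmentPreferencesChanged pre_series_attrs post_series_attrs)

-- ===== LEMMAS AND PROOFS =====

-- absent name ⇒ no alignment
lemma getAlignmentA_of_not_mem (a : List (String × List (String × String))) (name : String)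
    (h : name ∉ a.map Prod.fst) : getAlignmentA a name = none := by
  unfold getAlignmentA
  have : (PySem.Dict.mk a).get? name = none := by
    rw [PySem.Dict.get?_eq_none_iff_not_mem_keys]
    simpa [PySem.Dict.keys_mk] using h
  simp [this]

-- contains = false ⇒ get? = none
lemma get?_none_of_contains_false {κ ν : Type} [BEq κ] [LawfulBEq κ]
    (d : PySem.Dict κ ν) (k : κ) (h : d.contains k = false) : d.get? k = none := by
  rw [PySem.Dict.contains_eq_isSome_get?] at h
  cases hopt : d.get? k with
  | none => rfl
  | some v => rw [hopt] at h; simp at h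

-- the projection's lookup is exactly getAlignment (fold form, accumulator generalized)
lemma projB_fold_get? (a : List (String × List (String × String))) (d : PySem.Dict String String)
    (name : String)
    (hnd : (a.map Prod.fst).Nodup) (hd : ∀ p ∈ a, d.contains p.1 = false) :
    (a.foldl (fun d p =>
      match (PySem.Dict.mk p.2).get? "alignment" with
      | some v => d.insert p.1 v
      | none => d) d).get? name = (getAlignmentA a name).or (d.get? name) := by
  induction a generalizing d with
  | nil =>
    have h0 : (PySem.Dict.mk ([] : List (String × List (String × String)))).get? name = none := by
      rw [PySem.Dict.get?_eq_none_iff_not_mem_keys]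
      simp [PySem.Dict.keys_mk]
    simp [List.foldl_nil, getAlignmentA, h0]
  | cons hd0 tl ih =>
    obtain ⟨k, inner⟩ := hd0
    have hnd' : k ∉ tl.map Prod.fst ∧ (tl.map Prod.fst).Nodup := by
      rw [List.map_cons, List.nodup_cons] at hnd; exact hnd
    have hknotl := hnd'.1
    have hndtl := hnd'.2
    have hdk : d.contains k = false := hd ⟨k, inner⟩ List.mem_cons_self
    have hga : getAlignmentA ((k, inner) :: tl) name =
        if k = name then (PySem.Dict.mk inner).get? "alignment" else getAlignmentA tl name := by
      unfold getAlignmentA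
      rw [PySem.Dict.get?_mk_cons]
      by_cases hk : k = name <;> simp [hk]
    cases hal : (PySem.Dict.mk inner).get? "alignment" with
    | some v =>
      have hd' : ∀ p ∈ tl, (d.insert k v).contains p.1 = false := by
        intro p hp
        rw [PySem.Dict.contains_insert]
        have hne : p.1 ≠ k := by
          intro he; exact hknotl (he ▸ List.mem_map_of_mem hp)
        simp [hne, hd p (List.mem_cons_of_mem _ hp)]
      rw [List.foldl_cons]
      simp only [hal]
      rw [ih (d.insert k v) hndtl hd']
      by_cases hk : k = name
      · subst hk
        rw [getAlignmentA_of_not_mem tl k hknotl, hga]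
        simp [hal]
      · rw [hga, if_neg hk, PySem.Dict.get?_insert, if_neg (fun h => hk h.symm)]
    | none =>
      rw [List.foldl_cons]
      simp only [hal]
      rw [ih d hndtl (fun p hp => hd p (List.mem_cons_of_mem _ hp))]
      by_cases hk : k = name
      · subst hk
        rw [getAlignmentA_of_not_mem tl k hknotl, hga]
        simp [get?_none_of_contains_false d k hdk, hal]
      · rw [hga, if_neg hk]

lemma projB_get? (a : List (String × List (String × String))) (name : String)
    (hnd : (a.map Prod.fst).Nodup) :
    (projB a).get? name = getAlignmentA a name := by
  unfold projB
  rw [projB_fold_get? a PySem.Dict.empty name hnd (fun p _ => PySem.Dict.contains_empty _)]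
  simp [PySem.Dict.get?_empty]

-- Python dict == is pointwise lookup equality
lemma pyDictEqB_iff (d e : PySem.Dict String String) :
    pyDictEqB d e = true ↔ ∀ k, d.get? k = e.get? k := by
  unfold pyDictEqB
  simp only [Bool.and_eq_true, List.all_eq_true, beq_iff_eq]
  constructor
  · rintro ⟨h1, h2⟩ k
    by_cases hk : k ∈ d.keys
    · exact (h1 k hk).symm
    · by_cases hk' : k ∈ e.keys
      · exact h2 k hk'
      · have e1 : d.get? k = none := by rw [PySem.Dict.get?_eq_none_iff_not_mem_keys]; exact hk
        have e2 : e.get? k = none := by rw [PySem.Dict.get?_eq_none_iff_not_mem_keys]; exact hk'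
        rw [e1, e2]
  · intro h
    exact ⟨fun k _ => (h k).symm, fun k _ => h k⟩

-- A's inner loop vs B's projection comparison, for one category pair
lemma pair_changed_eq (a b : List (String × List (String × String)))
    (hna : (a.map Prod.fst).Nodup) (hnb : (b.map Prod.fst).Nodup) :
    ((PySem.Set.union (PySem.Set.ofList ((PySem.Dict.mk a).keys)) ((PySem.Dict.mk b).keys)).any
        (fun name => !(getAlignmentA a name == getAlignmentA b name)))
      = !(pyDictEqB (projB a) (projB b)) := by
  cases h : pyDictEqB (projB a) (projB b) with
  | false =>
    -- dicts differ: some key k has different lookups; k is in one of the key sets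
    have hne : ¬ ∀ k, (projB a).get? k = (projB b).get? k := by
      intro hall
      rw [(pyDictEqB_iff _ _).mpr hall] at h; cases h
    push Not at hne
    obtain ⟨k, hk⟩ := hne
    rw [projB_get? a k hna, projB_get? b k hnb] at hk
    have hmem : k ∈ PySem.Set.union (PySem.Set.ofList ((PySem.Dict.mk a).keys)) ((PySem.Dict.mk b).keys) := by
      rw [PySem.Set.mem_union]
      by_contra hnm
      push Not at hnm
      rw [PySem.Set.mem_ofList] at hnm
      simp only [PySem.Dict.keys_mk] at hnm
      rw [getAlignmentA_of_not_mem a k hnm.1, getAlignmentA_of_not_mem b k hnm.2] at hk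
      exact hk rfl
    rw [Bool.not_false, List.any_eq_true]
    exact ⟨k, hmem, by simp [hk]⟩
  | true =>
    -- dicts equal: every name agrees
    have hall := (pyDictEqB_iff _ _).mp h
    rw [Bool.not_true, List.any_eq_false]
    intro name _
    have hn := hall name
    rw [projB_get? a name hna, projB_get? b name hnb] at hn
    simp [hn]

-- ===== VERDICT (by name: the statement is the Claim_ definition above) =====
theorem alignmentPreferencesChanged_spec : Claim_equal_alignmentPreferencesChanged := by
  intro pre post _ hpre
  obtain ⟨h1, h2, h3, h4, hnpre, hnpost⟩ := hpre
  rw [PySem.Dict.contains_eq_isSome_get?] at h1 h2 h3 h4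
  obtain ⟨po, hpo⟩ := Option.isSome_iff_exists.mp h1
  obtain ⟨qo, hqo⟩ := Option.isSome_iff_exists.mp h2
  obtain ⟨pz, hpz⟩ := Option.isSome_iff_exists.mp h3
  obtain ⟨qz, hqz⟩ := Option.isSome_iff_exists.mp h4
  have npo : (po.map Prod.fst).Nodup := hnpre _ (PySem.Dict.mem_items_of_get?_eq_some _ hpo)
  have nqo : (qo.map Prod.fst).Nodup := hnpost _ (PySem.Dict.mem_items_of_get?_eq_some _ hqo)
  have npz : (pz.map Prod.fst).Nodup := hnpre _ (PySem.Dict.mem_items_of_get?_eq_some _ hpz)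
  have nqz : (qz.map Prod.fst).Nodup := hnpost _ (PySem.Dict.mem_items_of_get?_eq_some _ hqz)
  unfold Spec_alignmentPreferencesChanged alignmentPreferencesChanged alignmentPreferencesChanged_alt
  simp only [List.any_cons, List.any_nil]
  rw [hpo, hqo, hpz, hqz]
  simp only [Bool.or_false]
  rw [pair_changed_eq po qo npo nqo, pair_changed_eq pz qz npz nqz]
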